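-- pv_equiv track=rewrite | github.com/jamestexas/memoryweave | memoryweave/components/retrieval_strategies/chunked_fabric_strategy.py | _are_chunks_sequential
-- ===== SOURCE A (Python) =====
-- def _are_chunks_sequential(chunk_indices: list[int]) -> bool:
--     """
--     Check if chunks are sequential.
--
--     Args:
--         chunk_indices: List of chunk indices
--
--     Returns:
--         True if chunks are sequential
--     """
--     if not chunk_indices or len(chunk_indices) < 2:
--         return True
--
--     # Sort indices
--     sorted_indices = sorted(chunk_indices)
--
--     # Check if they form a sequence
--     for i in range(1, len(sorted_indices)):
--         if sorted_indices[i] != sorted_indices[i - 1] + 1: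
--             return False
--
--     return True
-- ===== SOURCE B (Python) =====
-- def _are_chunks_sequential(chunk_indices: list[int]) -> bool:
--     """One-pass check: n distinct values spanning exactly n-1 form a consecutive run."""
--     n = len(chunk_indices)
--     if n < 2:
--         return True
--     return len(set(chunk_indices)) == n and max(chunk_indices) - min(chunk_indices) == n - 1
-- ===== Notes on version B (the rewrite author's own statement) =====
-- stated objective: faster
-- what changed: Replaces sort-then-scan-adjacent-pairs with a single-pass set/max/min test: n distinct values whose max-min equals n-1 are exactly a consecutive sequence.
import Mathlib
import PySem

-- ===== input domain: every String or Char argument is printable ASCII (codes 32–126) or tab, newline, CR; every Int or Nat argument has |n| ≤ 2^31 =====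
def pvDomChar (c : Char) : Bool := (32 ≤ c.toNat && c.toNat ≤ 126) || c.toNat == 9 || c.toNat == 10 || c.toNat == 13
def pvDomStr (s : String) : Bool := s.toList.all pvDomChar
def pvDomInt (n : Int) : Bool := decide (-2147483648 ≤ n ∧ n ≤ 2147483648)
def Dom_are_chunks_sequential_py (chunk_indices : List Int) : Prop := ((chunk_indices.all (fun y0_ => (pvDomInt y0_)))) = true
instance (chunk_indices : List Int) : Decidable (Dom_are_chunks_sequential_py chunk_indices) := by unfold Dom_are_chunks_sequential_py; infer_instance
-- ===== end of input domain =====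

-- B replaces A's sort-then-adjacent-scan by a one-pass set-size / max-min span test (asymptotically faster).


-- ===== PORT A =====
def are_chunks_sequential_py (chunk_indices : List Int) : Bool :=
  if chunk_indices.isEmpty || decide (chunk_indices.length < 2) then true
  else
    let sorted_indices := PySem.List.sorted chunk_indices (fun x => x) false
    (PySem.List.pyRange 1 (sorted_indices.length : Int) 1).all (fun i =>
      decide (PySem.List.pyGetD sorted_indices i 0 = PySem.List.pyGetD sorted_indices (i - 1) 0 + 1))

-- ===== PORT B =====
def are_chunks_sequential_py_alt (chunk_indices : List Int) : Bool :=
  if chunk_indices.length < 2 then true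
  else
    decide ((PySem.Set.ofList chunk_indices).length = chunk_indices.length)
    && decide ((PySem.List.max? chunk_indices (fun x => x)).getD 0
               - (PySem.List.min? chunk_indices (fun x => x)).getD 0
               = (chunk_indices.length : Int) - 1)

-- ===== PRECONDITION & SPEC =====
def Spec_are_chunks_sequential_py (chunk_indices : List Int) (out : Bool) : Prop := out = are_chunks_sequential_py_alt chunk_indices
instance (chunk_indices : List Int) (out : Bool) : Decidable (Spec_are_chunks_sequential_py chunk_indices out) := by unfold Spec_are_chunks_sequential_py; infer_instance

-- ===== CLAIM (what is proved, stated in full; the proofs are below) =====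
def Claim_equal_are_chunks_sequential_py : Prop := ∀ (chunk_indices : List Int), Dom_are_chunks_sequential_py chunk_indices → Spec_are_chunks_sequential_py chunk_indices (are_chunks_sequential_py chunk_indices)

-- ===== LEMMAS AND PROOFS =====

-- set(xs) has as many elements as xs exactly when xs has no duplicates
lemma pvOfListLengthIff (xs : List Int) : (PySem.Set.ofList xs).length = xs.length ↔ xs.Nodup := by
  constructor
  · intro h
    have hperm : (PySem.Set.ofList xs).Perm xs.dedup := by
      rw [List.perm_ext_iff_of_nodup (PySem.Set.nodup_ofList xs) xs.nodup_dedup]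
      intro a; simp [PySem.Set.mem_ofList, List.mem_dedup]
    have hlen := hperm.length_eq
    have hsub := List.dedup_sublist xs
    have heq : xs.dedup = xs := hsub.eq_of_length (by omega)
    exact List.dedup_eq_self.mp heq
  · intro h; rw [PySem.Set.ofList_eq_self_of_nodup xs h]

-- A's range loop, as a statement about adjacent elements of the sorted list
lemma pvLoopIff (s : List Int) :
    ((PySem.List.pyRange 1 (s.length : Int) 1).all (fun i =>
      decide (PySem.List.pyGetD s i 0 = PySem.List.pyGetD s (i - 1) 0 + 1)) = true)
    ↔ (∀ k : Nat, k + 1 < s.length → s.getD (k + 1) 0 = s.getD k 0 + 1) := by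
  rw [List.all_eq_true]
  constructor
  · intro h k hk
    have hmem : ((k : Int) + 1) ∈ PySem.List.pyRange 1 (s.length : Int) 1 := by
      rw [PySem.List.mem_pyRange_one]; omega
    have := h _ hmem
    simp only [decide_eq_true_eq] at this
    have e1 : ((k : Int) + 1) = ((k + 1 : Nat) : Int) := by push_cast [Nat.cast_add]; ring
    rw [e1] at this
    rw [show ((k + 1 : Nat) : Int) - 1 = ((k : Nat) : Int) by push_cast; ring] at this
    rwa [PySem.List.pyGetD_natCast, PySem.List.pyGetD_natCast] at this
  · intro h i hi
    rw [PySem.List.mem_pyRange_one] at hi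
    simp only [decide_eq_true_eq]
    obtain ⟨h1, h2⟩ := hi
    have hk : ∃ k : Nat, i = (k : Int) + 1 ∧ k + 1 < s.length := by
      refine ⟨(i - 1).toNat, by omega, by omega⟩
    obtain ⟨k, rfl, hklt⟩ := hk
    have := h k hklt
    have e1 : ((k : Int) + 1) = ((k + 1 : Nat) : Int) := by omega
    rw [e1, show ((k + 1 : Nat) : Int) - 1 = ((k : Nat) : Int) by omega,
        PySem.List.pyGetD_natCast, PySem.List.pyGetD_natCast]
    exact this

-- in a chain with step exactly 1, every element is head + index
lemma pvChainExact (s : List Int)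
    (h : ∀ k : Nat, k + 1 < s.length → s.getD (k + 1) 0 = s.getD k 0 + 1) :
    ∀ k : Nat, k < s.length → s.getD k 0 = s.getD 0 0 + k := by
  intro k
  induction k with
  | zero => intro _; simp
  | succ m ih =>
    intro hlt
    have := h m hlt
    have := ih (by omega)
    push_cast
    omega

-- in a strictly increasing list, indices bound the growth from below
lemma pvStrictLower (s : List Int) (hs : s.Pairwise (· < ·)) :
    ∀ d k : Nat, k + d < s.length → s.getD k 0 + d ≤ s.getD (k + d) 0 := by
  intro d
  induction d with
  | zero => intro k _; simp
  | succ m ih =>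
    intro k hlt
    have h1 := ih k (by omega)
    have hstep : s.getD (k + m) 0 < s.getD (k + m + 1) 0 := by
      have hp := List.pairwise_iff_getElem.mp hs (k + m) (k + m + 1) (by omega) (by omega) (by omega)
      rwa [List.getD_eq_getElem s 0 (by omega), List.getD_eq_getElem s 0 (by omega)]
    have : k + (m + 1) = (k + m) + 1 := by omega
    rw [this]
    push_cast
    omega

-- the first element of the id-sorted list is the min value, the last the max value
lemma pvMinEq (l : List Int) (hne : l ≠ []) :
    (PySem.List.min? l (fun x => x)).getD 0 = (PySem.List.sorted l (fun x => x) false).getD 0 0 := by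
  obtain ⟨m, hm⟩ : ∃ m, PySem.List.min? l (fun x => x) = some m := by
    cases h : PySem.List.min? l (fun x => x) with
    | none => exact absurd ((PySem.List.min?_eq_none_iff l (fun x => x)).mp h) hne
    | some m => exact ⟨m, rfl⟩
  rw [hm, Option.getD_some]
  have hperm : (PySem.List.sorted l (fun x => x) false).Perm l := PySem.List.sorted_perm l (fun x => x) false
  have hslen : 0 < (PySem.List.sorted l (fun x => x) false).length := by
    rcases Nat.eq_zero_or_pos (PySem.List.sorted l (fun x => x) false).length with h0 | h0
    · exact absurd ((PySem.List.sorted_eq_nil_iff l (fun x => x) false).mp (List.length_eq_zero_iff.mp h0)) hne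
    · exact h0
  have hmem0 : (PySem.List.sorted l (fun x => x) false).getD 0 0 ∈ (PySem.List.sorted l (fun x => x) false) := by
    rw [List.getD_eq_getElem _ 0 hslen]
    exact List.getElem_mem _
  have h1 : m ≤ (PySem.List.sorted l (fun x => x) false).getD 0 0 :=
    PySem.List.min?_isMin hm _ (hperm.mem_iff.mp hmem0)
  have hm_in_s : m ∈ (PySem.List.sorted l (fun x => x) false) := hperm.mem_iff.mpr (PySem.List.min?_mem hm)
  obtain ⟨j, hj, hjm⟩ := List.getElem_of_mem hm_in_s
  have h2 : (PySem.List.sorted l (fun x => x) false).getD 0 0 ≤ m := by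
    have hmono := PySem.List.sorted_id_getElem_mono l (p := 0) (q := j) (by omega) hj
    rw [List.getD_eq_getElem _ 0 hslen]
    omega
  omega

lemma pvMaxEq (l : List Int) (hne : l ≠ []) :
    (PySem.List.max? l (fun x => x)).getD 0 = (PySem.List.sorted l (fun x => x) false).getD ((PySem.List.sorted l (fun x => x) false).length - 1) 0 := by
  obtain ⟨m, hm⟩ : ∃ m, PySem.List.max? l (fun x => x) = some m := by
    cases h : PySem.List.max? l (fun x => x) with
    | none => exact absurd ((PySem.List.max?_eq_none_iff l (fun x => x)).mp h) hne
    | some m => exact ⟨m, rfl⟩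
  rw [hm, Option.getD_some]
  have hperm : (PySem.List.sorted l (fun x => x) false).Perm l := PySem.List.sorted_perm l (fun x => x) false
  have hslen : 0 < (PySem.List.sorted l (fun x => x) false).length := by
    rcases Nat.eq_zero_or_pos (PySem.List.sorted l (fun x => x) false).length with h0 | h0
    · exact absurd ((PySem.List.sorted_eq_nil_iff l (fun x => x) false).mp (List.length_eq_zero_iff.mp h0)) hne
    · exact h0
  have hmemL : (PySem.List.sorted l (fun x => x) false).getD ((PySem.List.sorted l (fun x => x) false).length - 1) 0 ∈ (PySem.List.sorted l (fun x => x) false) := by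
    rw [List.getD_eq_getElem _ 0 (by omega)]
    exact List.getElem_mem _
  have h1 : (PySem.List.sorted l (fun x => x) false).getD ((PySem.List.sorted l (fun x => x) false).length - 1) 0 ≤ m :=
    PySem.List.max?_isMax hm _ (hperm.mem_iff.mp hmemL)
  have hm_in_s : m ∈ (PySem.List.sorted l (fun x => x) false) := hperm.mem_iff.mpr (PySem.List.max?_mem hm)
  obtain ⟨j, hj, hjm⟩ := List.getElem_of_mem hm_in_s
  have h2 : m ≤ (PySem.List.sorted l (fun x => x) false).getD ((PySem.List.sorted l (fun x => x) false).length - 1) 0 := by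
    have hmono := PySem.List.sorted_id_getElem_mono l (p := j) (q := (PySem.List.sorted l (fun x => x) false).length - 1) (by omega) (by omega)
    rw [List.getD_eq_getElem _ 0 (by omega)]
    omega
  omega

-- the core equivalence, on the sorted list
lemma pvCore (l : List Int) (hn : 2 ≤ l.length) :
    let s := PySem.List.sorted l (fun x => x) false
    ((∀ k : Nat, k + 1 < s.length → s.getD (k + 1) 0 = s.getD k 0 + 1)
      ↔ (l.Nodup ∧ s.getD (s.length - 1) 0 - s.getD 0 0 = (l.length : Int) - 1)) := by
  intro s
  have hperm : s.Perm l := PySem.List.sorted_perm l (fun x => x) false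
  have hlen : s.length = l.length := hperm.length_eq
  have hpw : s.Pairwise (· ≤ ·) := PySem.List.sorted_pairwise l (fun x => x)
  constructor
  · intro h
    have hexact := pvChainExact s h
    have hstrict : s.Pairwise (· < ·) := by
      rw [List.pairwise_iff_getElem]
      intro i j hi hj hij
      have e1 := hexact i (by omega)
      have e2 := hexact j (by omega)
      rw [List.getD_eq_getElem s 0 hi] at e1
      rw [List.getD_eq_getElem s 0 hj] at e2
      omega
    have hnd : l.Nodup := hperm.nodup_iff.mp hstrict.nodup
    refine ⟨hnd, ?_⟩
    have := hexact (s.length - 1) (by omega)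
    push_cast at this ⊢
    omega
  · rintro ⟨hnd, hspan⟩
    have hsnd : s.Nodup := hperm.nodup_iff.mpr hnd
    have hstrict : s.Pairwise (· < ·) := by
      rw [List.pairwise_iff_getElem]
      intro i j hi hj hij
      have hle := List.pairwise_iff_getElem.mp hpw i j hi hj hij
      have hne : s[i] ≠ s[j] := List.pairwise_iff_getElem.mp hsnd i j hi hj hij
      omega
    intro k hk
    have hlow := pvStrictLower s hstrict
    have h1 : s.getD 0 0 + (k : Int) ≤ s.getD k 0 := by
      have := hlow k 0 (by omega)
      simpa using this
    have h2 : s.getD (k + 1) 0 + ((s.length - 1 - (k + 1) : Nat) : Int) ≤ s.getD (s.length - 1) 0 := by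
      have := hlow (s.length - 1 - (k + 1)) (k + 1) (by omega)
      rw [show k + 1 + (s.length - 1 - (k + 1)) = s.length - 1 by omega] at this
      exact this
    have h3 : s.getD k 0 + 1 ≤ s.getD (k + 1) 0 := by
      have := hlow 1 k (by omega)
      simpa using this
    have hlen' : s.length = l.length := hlen
    omega

lemma pvMain (l : List Int) : are_chunks_sequential_py l = are_chunks_sequential_py_alt l := by
  unfold are_chunks_sequential_py are_chunks_sequential_py_alt
  by_cases hsmall : l.length < 2
  · rw [if_pos (by simp [hsmall]), if_pos hsmall]
  · have hne : l ≠ [] := by intro h; subst h; simp at hsmall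
    rw [if_neg (by simp [List.isEmpty_iff, hne]; omega), if_neg hsmall]
    have hcore := pvCore l (by omega)
    simp only at hcore
    have hmin := pvMinEq l hne
    have hmax := pvMaxEq l hne
    rw [Bool.eq_iff_iff]
    simp only [Bool.and_eq_true, decide_eq_true_eq]
    rw [pvLoopIff, pvOfListLengthIff, hmin, hmax]
    exact hcore

-- ===== VERDICT (by name: the statement is the Claim_ definition above) =====
theorem are_chunks_sequential_py_spec : Claim_equal_are_chunks_sequential_py := by
  intro l _
  unfold Spec_are_chunks_sequential_py
  exact pvMain l
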